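-- pv_equiv track=rewrite | github.com/alphaka/A-Magical-Code | agents/agent8.py | huffman_decode_message
-- ===== SOURCE A (Python) =====
-- def huffman_decode_message(encoded_message: str, encoding: dict[str, str]):
--     """
--     Decodes a message using the given encoding.
--     """
--     decoded_message = ""
--     while encoded_message:
--         dead = True
--         for char, code in encoding.items():
--             if encoded_message.startswith(code):
--                 dead = False
--                 decoded_message += char
--                 encoded_message = encoded_message[len(code) :]
--         if dead:
--             break
--     return decoded_message
-- ===== SOURCE B (Python) =====
-- def huffman_decode_message(encoded_message: str, encoding: dict[str, str]):
--     """
--     Decodes a message using the given encoding.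
--
--     Single left-to-right scan: grow a buffer of bits and emit a symbol as soon
--     as the buffer is a code, using a reverse code->symbol dictionary.
--     """
--     rev = {code: char for char, code in encoding.items()}
--     out = []
--     cur = ""
--     for bit in encoded_message:
--         cur += bit
--         ch = rev.get(cur)
--         if ch is not None:
--             out.append(ch)
--             cur = ""
--     return "".join(out)
-- ===== Notes on version B (the rewrite author's own statement) =====
-- stated objective: faster
-- what changed: Instead of rescanning the whole code table against the remaining message again and again (with quadratic string slicing), B builds a reverse code->symbol dictionary once and makes a single left-to-right pass over the message, growing a bit buffer and emitting a symbol whenever the buffer is a code.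
-- outside the precondition, e.g. on huffman_decode_message('0', {'a': '', 'b': '0'}): A returns 'ab', B returns 'b'; on huffman_decode_message('001', {'b': '0', 'a': '01'}): A returns 'ba', B returns 'bb'
import Mathlib
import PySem

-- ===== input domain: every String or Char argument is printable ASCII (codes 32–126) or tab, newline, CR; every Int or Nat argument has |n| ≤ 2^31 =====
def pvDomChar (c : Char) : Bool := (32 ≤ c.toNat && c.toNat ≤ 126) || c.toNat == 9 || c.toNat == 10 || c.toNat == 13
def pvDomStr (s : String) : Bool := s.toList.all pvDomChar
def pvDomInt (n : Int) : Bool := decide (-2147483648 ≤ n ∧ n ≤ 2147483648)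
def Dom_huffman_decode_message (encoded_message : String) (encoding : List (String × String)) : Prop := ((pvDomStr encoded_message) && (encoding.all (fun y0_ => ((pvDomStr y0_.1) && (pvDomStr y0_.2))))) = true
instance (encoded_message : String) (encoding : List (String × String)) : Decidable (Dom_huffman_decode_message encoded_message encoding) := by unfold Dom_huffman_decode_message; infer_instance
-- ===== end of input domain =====

-- B replaces A's repeated rescans of the code table by one left-to-right pass with a
-- reverse code→symbol dictionary and a growing buffer; equality is claimed on Pre_
-- (empty message, or distinct keys with nonempty prefix-free codes).

-- ===== PORT A =====
-- the 'for char, code in encoding.items():' body (one full pass of the inner loop)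
def pvPassA (items : List (String × String)) (msg dec : List Char) (dead : Bool) :
    List Char × List Char × Bool :=
  match items with
  | [] => (dec, msg, dead)
  | (ch, code) :: rest =>
      if PySem.Chars.startswith msg code.toList then
        pvPassA rest (PySem.List.slice msg (some (code.toList.length : Int)) none)
          (dec ++ ch.toList) false
      else pvPassA rest msg dec dead

-- the 'while encoded_message:' loop; fuel only makes the recursion total (under
-- Pre_ each non-dead pass strictly shortens the message, so fuel = length+1 suffices)
def pvWhileA (fuel : Nat) (items : List (String × String)) (msg dec : List Char) : List Char :=
  match fuel with
  | 0 => dec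
  | fuel + 1 =>
      if msg = [] then dec
      else
        match pvPassA items msg dec true with
        | (dec', msg', dead) => if dead then dec' else pvWhileA fuel items msg' dec'

def huffman_decode_message (encoded_message : String) (encoding : List (String × String)) : String :=
  String.ofList (pvWhileA (encoded_message.toList.length + 1)
    (PySem.Dict.ofList encoding).items encoded_message.toList [])

-- ===== PORT B =====
-- rev = {code: char for char, code in encoding.items()}
def pvRevB (items : List (String × String)) : PySem.Dict String String :=
  items.foldl (fun d p => d.insert p.2 p.1) PySem.Dict.empty

-- the 'for bit in encoded_message:' loop of B
def pvScanB (rev : PySem.Dict String String) (cs cur : List Char) (out : List String) : List String :=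
  match cs with
  | [] => out
  | c :: cs =>
      let cur' := cur ++ [c]
      match rev.get? (String.ofList cur') with
      | some ch => pvScanB rev cs [] (out ++ [ch])
      | none => pvScanB rev cs cur' out

def huffman_decode_message_alt (encoded_message : String) (encoding : List (String × String)) : String :=
  PySem.Str.join "" (pvScanB (pvRevB (PySem.Dict.ofList encoding).items)
    encoded_message.toList [] [])

-- ===== PRECONDITION & SPEC =====
-- Pre_ admits every empty message (A returns "" without reading the encoding) and
-- otherwise the usual prefix-code domain: distinct keys (the assoc list feeds a
-- Python dict, where a duplicate key silently collapses), nonempty codes (an empty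
-- code can make A loop forever), and a prefix-free code set (otherwise the decoding
-- is ambiguous and A's mid-pass scan order makes its result an accident of dict order).
def Pre_huffman_decode_message (encoded_message : String) (encoding : List (String × String)) : Prop :=
  encoded_message = "" ∨
  ((encoding.map Prod.fst).Nodup ∧
   (∀ p ∈ encoding, p.2 ≠ "") ∧
   encoding.Pairwise (fun p q => ¬ (p.2.toList <+: q.2.toList) ∧ ¬ (q.2.toList <+: p.2.toList)))
instance (encoded_message : String) (encoding : List (String × String)) : Decidable (Pre_huffman_decode_message encoded_message encoding) := by unfold Pre_huffman_decode_message; infer_instance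

def pvWitness_huffman_decode_message : String × (List (String × String)) :=
  ("0110", [("a", "0"), ("b", "1")])

def Spec_huffman_decode_message (encoded_message : String) (encoding : List (String × String)) (out : String) : Prop := out = huffman_decode_message_alt encoded_message encoding
instance (encoded_message : String) (encoding : List (String × String)) (out : String) : Decidable (Spec_huffman_decode_message encoded_message encoding out) := by unfold Spec_huffman_decode_message; infer_instance

-- ===== CLAIM (what is proved, stated in full; the proofs are below) =====
def Claim_equal_huffman_decode_message : Prop := ∀ (encoded_message : String) (encoding : List (String × String)), Dom_huffman_decode_message encoded_message encoding → Pre_huffman_decode_message encoded_message encoding → Spec_huffman_decode_message encoded_message encoding (huffman_decode_message encoded_message encoding)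

-- ===== LEMMAS AND PROOFS =====

-- the hypotheses both proofs use, in elementwise form: codes nonempty and prefix-free
def pvGood (items : List (String × String)) : Prop :=
  (∀ p ∈ items, p.2.toList ≠ []) ∧
  (∀ p ∈ items, ∀ q ∈ items, p ≠ q → ¬ (p.2.toList <+: q.2.toList))

-- first (char, code) of items whose code is a prefix of m, with the rest of m
def pvFind (items : List (String × String)) (m : List Char) : Option (String × List Char) :=
  match items with
  | [] => none
  | p :: rest =>
      if p.2.toList <+: m then some (p.1, m.drop p.2.toList.length) else pvFind rest m

-- the greedy prefix-code decode both programs compute under Pre_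
def pvGreedy (items : List (String × String)) (m : List Char) : List Char :=
  match pvFind items m with
  | some (k, m') => if _ : m'.length < m.length then k.toList ++ pvGreedy items m' else k.toList
  | none => []
termination_by m.length

theorem pvGood_tail {p : String × String} {rest : List (String × String)}
    (h : pvGood (p :: rest)) : pvGood rest := by
  obtain ⟨h1, h2⟩ := h
  exact ⟨fun q hq => h1 q (List.mem_cons_of_mem _ hq),
    fun q hq r hr hne => h2 q (List.mem_cons_of_mem _ hq) r (List.mem_cons_of_mem _ hr) hne⟩

theorem pvFind_sound {items : List (String × String)} {m m' : List Char} {k : String}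
    (h : pvFind items m = some (k, m')) :
    ∃ p ∈ items, p.1 = k ∧ p.2.toList <+: m ∧ m' = m.drop p.2.toList.length := by
  induction items with
  | nil => simp [pvFind] at h
  | cons q rest ih =>
      by_cases hq : q.2.toList <+: m
      · simp [pvFind, hq] at h
        exact ⟨q, List.mem_cons_self, h.1, hq, h.2.symm⟩
      · simp [pvFind, hq] at h
        obtain ⟨p, hp, h⟩ := ih h
        exact ⟨p, List.mem_cons_of_mem _ hp, h⟩

theorem pvFind_of_mem {items : List (String × String)} {m : List Char}
    {p : String × String} (hg : pvGood items) (hp : p ∈ items) (hm : p.2.toList <+: m) :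
    pvFind items m = some (p.1, m.drop p.2.toList.length) := by
  induction items with
  | nil => cases hp
  | cons q rest ih =>
      by_cases hq : q.2.toList <+: m
      · have : p = q := by
          by_contra hne
          rcases List.prefix_or_prefix_of_prefix hm hq with h | h
          · exact hg.2 p hp q (List.mem_cons_self) hne h
          · exact hg.2 q (List.mem_cons_self) p hp (Ne.symm hne) h
        subst this
        simp [pvFind, hq]
      · have hpr : p ∈ rest := by
          cases List.mem_cons.mp hp with
          | inl h => exact absurd (h ▸ hm) hq
          | inr h => exact h
        simp [pvFind, hq]
        exact ih (pvGood_tail hg) hpr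

theorem pvFind_none {items : List (String × String)} {m : List Char}
    (h : ∀ p ∈ items, ¬ p.2.toList <+: m) : pvFind items m = none := by
  induction items with
  | nil => rfl
  | cons q rest ih =>
      simp [pvFind, h q List.mem_cons_self]
      exact ih (fun p hp => h p (List.mem_cons_of_mem _ hp))

theorem pvFind_lt {items : List (String × String)} {m m' : List Char} {k : String}
    (hg : pvGood items) (h : pvFind items m = some (k, m')) : m'.length < m.length := by
  obtain ⟨p, hp, -, hpre, hdrop⟩ := pvFind_sound h
  have h1 : 0 < p.2.toList.length := by
    rcases Nat.eq_zero_or_pos p.2.toList.length with hh | hh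
    · exact absurd (List.length_eq_zero_iff.mp hh) (hg.1 p hp)
    · exact hh
  have h2 : p.2.toList.length ≤ m.length := hpre.length_le
  subst hdrop
  rw [List.length_drop]
  omega

theorem pvGreedy_none {items : List (String × String)} {m : List Char}
    (h : pvFind items m = none) : pvGreedy items m = [] := by
  rw [pvGreedy, h]

theorem pvGreedy_some {items : List (String × String)} {m m' : List Char} {k : String}
    (hg : pvGood items) (h : pvFind items m = some (k, m')) :
    pvGreedy items m = k.toList ++ pvGreedy items m' := by
  rw [pvGreedy, h]
  simp [pvFind_lt hg h]

theorem pvGreedy_nil {items : List (String × String)} (hg : pvGood items) :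
    pvGreedy items [] = [] := by
  apply pvGreedy_none
  apply pvFind_none
  intro p hp hpre
  exact hg.1 p hp (List.prefix_nil.mp hpre)

-- n-step greedy reduction m →* m' emitting s
inductive pvChain (items : List (String × String)) : Nat → List Char → List Char → List Char → Prop
  | nil (m : List Char) : pvChain items 0 m [] m
  | step {n : Nat} {m m₁ m' s : List Char} {k : String} :
      pvFind items m = some (k, m₁) → pvChain items n m₁ s m' →
      pvChain items (n + 1) m (k.toList ++ s) m'

theorem pvChain_greedy {items : List (String × String)} {n : Nat} {m s m' : List Char}
    (hg : pvGood items) (h : pvChain items n m s m') :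
    pvGreedy items m = s ++ pvGreedy items m' := by
  induction h with
  | nil => simp
  | step hf _ ih => rw [pvGreedy_some hg hf, ih, List.append_assoc]

theorem pvChain_zero {items : List (String × String)} {m s m' : List Char}
    (h : pvChain items 0 m s m') : s = [] ∧ m' = m := by
  cases h; exact ⟨rfl, rfl⟩

theorem pvChain_length {items : List (String × String)} {n : Nat} {m s m' : List Char}
    (hg : pvGood items) (h : pvChain items n m s m') :
    m'.length ≤ m.length ∧ (0 < n → m'.length < m.length) := by
  induction h with
  | nil => omega
  | step hf _ ih =>
      have := pvFind_lt hg hf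
      exact ⟨by omega, fun _ => by omega⟩

theorem pvPassA_spec {I : List (String × String)} (hg : pvGood I) :
    ∀ (J : List (String × String)), (∀ p ∈ J, p ∈ I) →
    ∀ (m dec : List Char) (dead : Bool), ∃ n s m',
      pvPassA J m dec dead = (dec ++ s, m', dead && decide (n = 0)) ∧
      pvChain I n m s m' ∧ ((∃ p ∈ J, p.2.toList <+: m) → 0 < n) := by
  intro J
  induction J with
  | nil =>
      intro _ m dec dead
      exact ⟨0, [], m, by simp [pvPassA], pvChain.nil m, by simp⟩
  | cons q rest ih =>
      intro hJ m dec dead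
      by_cases hq : q.2.toList <+: m
      · have hf : pvFind I m = some (q.1, m.drop q.2.toList.length) :=
          pvFind_of_mem hg (hJ q List.mem_cons_self) hq
        obtain ⟨n, s, m', heq, hch, -⟩ :=
          ih (fun p hp => hJ p (List.mem_cons_of_mem _ hp))
            (m.drop q.2.toList.length) (dec ++ q.1.toList) false
        refine ⟨n + 1, q.1.toList ++ s, m', ?_, pvChain.step hf hch, fun _ => by omega⟩
        have hsw : PySem.Chars.startswith m q.2.toList = true := by
          simpa [PySem.Chars.startswith, List.isPrefixOf_iff_prefix] using hq
        simp only [pvPassA, hsw, if_pos]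
        rw [PySem.List.slice_from_natCast]
        simpa [List.append_assoc] using heq
      · have hsw : ¬ PySem.Chars.startswith m q.2.toList = true := by
          simpa [PySem.Chars.startswith, List.isPrefixOf_iff_prefix] using hq
        obtain ⟨n, s, m', heq, hch, hpos⟩ :=
          ih (fun p hp => hJ p (List.mem_cons_of_mem _ hp)) m dec dead
        refine ⟨n, s, m', by simpa [pvPassA, hsw] using heq, hch, ?_⟩
        rintro ⟨p, hp, hpre⟩
        cases List.mem_cons.mp hp with
        | inl h => exact absurd (h ▸ hpre) hq
        | inr h => exact hpos ⟨p, h, hpre⟩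

theorem pvWhileA_spec {I : List (String × String)} (hg : pvGood I) :
    ∀ (fuel : Nat) (m dec : List Char), m.length < fuel →
      pvWhileA fuel I m dec = dec ++ pvGreedy I m := by
  intro fuel
  induction fuel with
  | zero => omega
  | succ fuel ih =>
      intro m dec hlen
      by_cases hm : m = []
      · subst hm
        simp [pvWhileA, pvGreedy_nil hg]
      · obtain ⟨n, s, m', heq, hch, hpos⟩ := pvPassA_spec hg I (fun _ h => h) m dec true
        cases n with
        | zero =>
            obtain ⟨hs, hm'⟩ := pvChain_zero hch
            have hnone : pvFind I m = none := by
              apply pvFind_none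
              intro p hp hpre
              exact absurd (hpos ⟨p, hp, hpre⟩) (by omega)
            subst hs
            rw [hm'] at heq
            simp [pvWhileA, hm, heq, pvGreedy_none hnone]
        | succ n =>
            have hlt : m'.length < m.length := (pvChain_length hg hch).2 (by omega)
            have : pvWhileA (fuel + 1) I m dec = pvWhileA fuel I m' (dec ++ s) := by
              simp [pvWhileA, hm, heq]
            rw [this, ih m' (dec ++ s) (by omega),
              pvChain_greedy hg hch, List.append_assoc]

-- ===== B side =====

theorem pvDict_items_update {d : PySem.Dict String String} {l : List (String × String)}
    (hnd : (l.map Prod.fst).Nodup) (hdis : ∀ p ∈ l, d.contains p.1 = false) :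
    (d.update l).items = d.items ++ l := by
  induction l generalizing d with
  | nil => simp [PySem.Dict.update]
  | cons p l ih =>
      have hins : (d.insert p.1 p.2).items = d.items ++ [p] := by
        simp [PySem.Dict.insert, hdis p List.mem_cons_self]
      have hstep : (d.update (p :: l)).items = ((d.insert p.1 p.2).update l).items := by
        simp [PySem.Dict.update]
      rw [hstep, ih (by simpa using hnd.of_cons)]
      · rw [hins, List.append_assoc]
        rfl
      · intro q hq
        rw [PySem.Dict.contains_insert, hdis q (List.mem_cons_of_mem _ hq)]
        have : q.1 ≠ p.1 := by
          intro h
          exact (List.nodup_cons.mp hnd).1 (h ▸ List.mem_map_of_mem hq)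
        simp [this]

theorem pvRevB_eq (I : List (String × String)) :
    pvRevB I = PySem.Dict.empty.update (I.map (fun p => (p.2, p.1))) := by
  simp [pvRevB, PySem.Dict.update, List.foldl_map]

theorem pvRevB_items {I : List (String × String)}
    (hnd : ((I.map (fun p => (p.2, p.1))).map Prod.fst).Nodup) :
    (pvRevB I).items = I.map (fun p => (p.2, p.1)) := by
  rw [pvRevB_eq, pvDict_items_update hnd (by simp)]
  rfl

theorem pvScanB_spec {I : List (String × String)} (hg : pvGood I)
    (hnd : ((I.map (fun p => (p.2, p.1))).map Prod.fst).Nodup) :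
    ∀ (cs cur : List Char) (out : List String),
      (∀ p ∈ I, ¬ (p.2.toList <+: cur)) →
      ((pvScanB (pvRevB I) cs cur out).map String.toList).flatten =
        (out.map String.toList).flatten ++ pvGreedy I (cur ++ cs) := by
  intro cs
  induction cs with
  | nil =>
      intro cur out hinv
      have hnone : pvFind I cur = none := pvFind_none hinv
      simp [pvScanB, pvGreedy_none hnone]
  | cons c cs ih =>
      intro cur out hinv
      have hsplit : cur ++ c :: cs = (cur ++ [c]) ++ cs := by simp
      cases hget : (pvRevB I).get? (String.ofList (cur ++ [c])) with
      | some ch =>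
          have hmem : (String.ofList (cur ++ [c]), ch) ∈ (pvRevB I).items :=
            PySem.Dict.mem_items_of_get?_eq_some _ hget
          rw [pvRevB_items hnd] at hmem
          obtain ⟨p, hp, hpeq⟩ := List.mem_map.mp hmem
          have hcode : p.2.toList = cur ++ [c] := by
            have : p.2 = String.ofList (cur ++ [c]) := congrArg Prod.fst hpeq
            rw [this]
            exact (String.ofList_eq.mp rfl).symm
          have hch : p.1 = ch := congrArg Prod.snd hpeq
          have hpre : p.2.toList <+: (cur ++ [c]) ++ cs := hcode ▸ ⟨cs, rfl⟩
          have hf : pvFind I ((cur ++ [c]) ++ cs) = some (ch, cs) := by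
            rw [pvFind_of_mem hg hp hpre, hch, hcode, List.drop_left]
          have hg2 : pvGreedy I ((cur ++ [c]) ++ cs) = ch.toList ++ pvGreedy I cs :=
            pvGreedy_some hg hf
          have hinv0 : ∀ p ∈ I, ¬ (p.2.toList <+: ([] : List Char)) := by
            intro q hq h
            exact hg.1 q hq (List.prefix_nil.mp h)
          calc ((pvScanB (pvRevB I) (c :: cs) cur out).map String.toList).flatten
              = ((pvScanB (pvRevB I) cs [] (out ++ [ch])).map String.toList).flatten := by
                simp only [pvScanB]
                rw [hget]
            _ = ((out ++ [ch]).map String.toList).flatten ++ pvGreedy I ([] ++ cs) :=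
                ih [] (out ++ [ch]) hinv0
            _ = (out.map String.toList).flatten ++ pvGreedy I (cur ++ c :: cs) := by
                rw [hsplit, hg2]
                simp
      | none =>
          have hnk : ∀ p ∈ I, p.2.toList ≠ cur ++ [c] := by
            intro p hp h
            have hks : String.ofList (cur ++ [c]) ∉ (pvRevB I).keys :=
              (PySem.Dict.get?_eq_none_iff_not_mem_keys _ _).mp hget
            apply hks
            have : p.2 = String.ofList (cur ++ [c]) := by
              rw [← h, String.ofList_toList]
            simp only [PySem.Dict.keys, pvRevB_items hnd]
            rw [← this]
            exact List.mem_map_of_mem (List.mem_map_of_mem hp)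
          have hinv' : ∀ p ∈ I, ¬ (p.2.toList <+: cur ++ [c]) := by
            intro p hp h
            rcases List.prefix_concat_iff.mp h with h | h
            · exact hnk p hp h
            · exact hinv p hp h
          calc ((pvScanB (pvRevB I) (c :: cs) cur out).map String.toList).flatten
              = ((pvScanB (pvRevB I) cs (cur ++ [c]) out).map String.toList).flatten := by
                simp only [pvScanB]
                rw [hget]
            _ = (out.map String.toList).flatten ++ pvGreedy I ((cur ++ [c]) ++ cs) :=
                ih (cur ++ [c]) out hinv'
            _ = (out.map String.toList).flatten ++ pvGreedy I (cur ++ c :: cs) := by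
                rw [hsplit]

theorem pvIntercalate_nil (l : List (List Char)) : [].intercalate l = l.flatten := by
  induction l with
  | nil => simp [List.intercalate]
  | cons x xs ih =>
      cases xs with
      | nil => simp [List.intercalate]
      | cons y ys =>
          simp only [List.intercalate] at *
          simp [List.intersperse] at *
          simp_all

theorem pvJoin_toList (parts : List String) :
    (PySem.Str.join "" parts).toList = (parts.map String.toList).flatten := by
  simp [pysem, PySem.Chars.join, pvIntercalate_nil]

-- ===== VERDICT (by name: the statement is the Claim_ definition above) =====
theorem huffman_decode_message_spec : Claim_equal_huffman_decode_message := by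
  intro em enc _ hpre
  rcases hpre with hem | ⟨hkeys, hne, hpw⟩
  · subst hem
    unfold Spec_huffman_decode_message huffman_decode_message huffman_decode_message_alt
    simp [pvWhileA, pvScanB]
    decide
  unfold Spec_huffman_decode_message huffman_decode_message huffman_decode_message_alt
  have hitems : (PySem.Dict.ofList enc).items = enc := by
    have h := pvDict_items_update (d := (PySem.Dict.empty : PySem.Dict String String))
      hkeys (fun p _ => by simp)
    simpa [PySem.Dict.ofList] using h
  have hg : pvGood enc := by
    refine ⟨fun p hp h => hne p hp (String.toList_eq_nil_iff.mp h), ?_⟩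
    intro p hp q hq hpq
    exact (List.Pairwise.forall (fun a b hab => ⟨hab.2, hab.1⟩) hpw hp hq hpq).1
  have hcodes : (enc.Pairwise (fun p q => p.2 ≠ q.2)) := by
    refine hpw.imp ?_
    intro a b hab heq
    exact hab.1 (by rw [heq])
  have hnd : ((enc.map (fun p => (p.2, p.1))).map Prod.fst).Nodup := by
    simpa [List.Nodup, List.pairwise_map] using hcodes
  rw [hitems, pvWhileA_spec hg _ _ [] (Nat.lt_succ_self _), List.nil_append]
  apply String.ofList_eq.mpr
  rw [pvJoin_toList,
    pvScanB_spec hg hnd em.toList [] []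
      (fun p hp h => hg.1 p hp (List.prefix_nil.mp h))]
  simp
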